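-- pv_equiv track=rewrite | github.com/GDevelopApp/GDevelop-documentation | dokuwiki2wikijs/dokuwiki2wikijs.py | fix_dokuwiki_headings_to_markdown
-- ===== SOURCE A (Python) =====
-- def fix_dokuwiki_headings_to_markdown(lines):
--     new_lines = []
--     for i, line in enumerate(lines):
--         if line.startswith("=======") and line.endswith("======="):
--             new_lines.append("# " + line.replace("=", ""))
--         elif line.startswith("======") and line.endswith("======"):
--             new_lines.append("## " + line.replace("=", ""))
--         elif line.startswith("=====") and line.endswith("====="):
--             new_lines.append("### " + line.replace("=", ""))
--         elif line.startswith("===") and line.endswith("==="):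
--             new_lines.append("#### " + line.replace("=", ""))
--         else:
--             new_lines.append(line)
--     return new_lines
-- ===== SOURCE B (Python) =====
-- # Count the equals once on each side and dispatch through a prefix table,
-- # instead of A's chain of startswith/endswith tests.
-- _PREFIX = {3: "#### ", 4: "#### ", 5: "### ", 6: "## ", 7: "# "}
--
-- def fix_dokuwiki_headings_to_markdown(lines):
--     new_lines = []
--     for line in lines:
--         m = min(len(line) - len(line.lstrip("=")),
--                 len(line) - len(line.rstrip("=")))
--         prefix = _PREFIX.get(min(m, 7))
--         new_lines.append(prefix + line.replace("=", "") if prefix else line)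
--     return new_lines
-- ===== Notes on version B (the rewrite author's own statement) =====
-- stated objective: alternative
-- what changed: Replaces A's chain of symmetric startswith/endswith tests with a single count of leading and trailing '=' characters per line and a threshold table (dict) lookup mapping min(lead,trail) to the markdown prefix.
import Mathlib
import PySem

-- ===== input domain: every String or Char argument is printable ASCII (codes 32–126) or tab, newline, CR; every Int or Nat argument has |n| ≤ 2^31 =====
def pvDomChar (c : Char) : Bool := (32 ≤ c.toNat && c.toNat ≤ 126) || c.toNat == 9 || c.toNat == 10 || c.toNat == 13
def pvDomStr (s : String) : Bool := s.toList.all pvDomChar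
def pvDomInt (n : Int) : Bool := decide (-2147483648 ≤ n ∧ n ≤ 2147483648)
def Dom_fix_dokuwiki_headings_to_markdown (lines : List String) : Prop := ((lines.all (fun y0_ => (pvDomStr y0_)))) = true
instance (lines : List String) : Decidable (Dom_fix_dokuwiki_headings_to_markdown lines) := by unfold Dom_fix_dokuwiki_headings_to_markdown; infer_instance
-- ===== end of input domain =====

-- B counts the '=' on each side once and dispatches through a prefix table instead of A's startswith/endswith chain (alternative decomposition, same cost).

-- ===== PORT A =====
def fix_dokuwiki_headings_to_markdown (lines : List String) : List String :=
  (PySem.List.enumerate lines 0).foldl (fun new_lines p =>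
    let line := p.2
    if PySem.Str.startswith line "=======" && PySem.Str.endswith line "=======" then
      new_lines ++ ["# " ++ PySem.Str.replace line "=" ""]
    else if PySem.Str.startswith line "======" && PySem.Str.endswith line "======" then
      new_lines ++ ["## " ++ PySem.Str.replace line "=" ""]
    else if PySem.Str.startswith line "=====" && PySem.Str.endswith line "=====" then
      new_lines ++ ["### " ++ PySem.Str.replace line "=" ""]
    else if PySem.Str.startswith line "===" && PySem.Str.endswith line "===" then
      new_lines ++ ["#### " ++ PySem.Str.replace line "=" ""]
    else
      new_lines ++ [line]) []

-- ===== PORT B =====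
def pvPrefixTable : PySem.Dict Nat String :=
  PySem.Dict.mk [(3, "#### "), (4, "#### "), (5, "### "), (6, "## "), (7, "# ")]

-- len(line) - len(line.lstrip("=")) = number of leading '='; hand port (exact): takeWhile counts them
def pvLead (s : String) : Nat := (s.toList.takeWhile (· == '=')).length
-- len(line) - len(line.rstrip("=")) = number of trailing '='; hand port (exact) via reverse
def pvTrail (s : String) : Nat := (s.toList.reverse.takeWhile (· == '=')).length

def fix_dokuwiki_headings_to_markdown_alt (lines : List String) : List String :=
  lines.foldl (fun new_lines line =>
    let m := min (pvLead line) (pvTrail line)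
    new_lines ++ [match pvPrefixTable.get? (min m 7) with
      | some pre => pre ++ PySem.Str.replace line "=" ""
      | none => line]) []

-- ===== PRECONDITION & SPEC =====
def Spec_fix_dokuwiki_headings_to_markdown (lines : List String) (out : List String) : Prop := out = fix_dokuwiki_headings_to_markdown_alt lines
instance (lines : List String) (out : List String) : Decidable (Spec_fix_dokuwiki_headings_to_markdown lines out) := by unfold Spec_fix_dokuwiki_headings_to_markdown; infer_instance

-- ===== CLAIM (what is proved, stated in full; the proofs are below) =====
def Claim_equal_fix_dokuwiki_headings_to_markdown : Prop := ∀ (lines : List String), Dom_fix_dokuwiki_headings_to_markdown lines → Spec_fix_dokuwiki_headings_to_markdown lines (fix_dokuwiki_headings_to_markdown lines)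

-- ===== LEMMAS AND PROOFS =====

theorem foldl_append_map {α β : Type} (f : α → β) (l : List α) (acc : List β) :
    l.foldl (fun a x => a ++ [f x]) acc = acc ++ l.map f := by
  induction l generalizing acc with
  | nil => simp
  | cons x xs ih => simp [List.foldl_cons, ih]

theorem rep_prefix (c : Char) : ∀ (n : Nat) (cs : List Char),
    (List.replicate n c <+: cs) ↔ n ≤ (cs.takeWhile (· == c)).length := by
  intro n
  induction n with
  | zero => intro cs; simp
  | succ k ih =>
    intro cs
    cases cs with
    | nil => simp [List.replicate_succ]
    | cons d ds =>
      by_cases hd : d = c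
      · subst hd
        simp [List.replicate_succ, ih ds]
      · constructor
        · intro h
          exfalso
          rcases h with ⟨t, ht⟩
          simp [List.replicate_succ] at ht
          exact hd ht.1.symm
        · intro h
          simp [hd] at h
  
theorem sw_rep (k : Nat) (s : List Char) :
    PySem.Chars.startswith s (List.replicate k '=') = decide (k ≤ (s.takeWhile (· == '=')).length) := by
  by_cases h : k ≤ (s.takeWhile (· == '=')).length
  · simp only [h, decide_true]
    exact (PySem.Chars.startswith_iff s _).mpr ((rep_prefix '=' k s).mpr h)
  · simp only [h, decide_false]
    cases hb : PySem.Chars.startswith s (List.replicate k '=') with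
    | false => rfl
    | true => exact absurd ((rep_prefix '=' k s).mp ((PySem.Chars.startswith_iff s _).mp hb)) h

theorem ew_rep (k : Nat) (s : List Char) :
    PySem.Chars.endswith s (List.replicate k '=') = decide (k ≤ (s.reverse.takeWhile (· == '=')).length) := by
  by_cases h : k ≤ (s.reverse.takeWhile (· == '=')).length
  · simp only [h, decide_true]
    refine (PySem.Chars.endswith_iff s _).mpr ?_
    have := (rep_prefix '=' k s.reverse).mpr h
    rw [← List.reverse_replicate] at this
    exact List.reverse_prefix.mp this
  · simp only [h, decide_false]
    cases hb : PySem.Chars.endswith s (List.replicate k '=') with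
    | false => rfl
    | true =>
      have hs := (PySem.Chars.endswith_iff s _).mp hb
      have : List.replicate k '=' <+: s.reverse := by
        rw [← List.reverse_replicate]
        exact List.reverse_prefix.mpr hs
      exact absurd ((rep_prefix '=' k s.reverse).mp this) h

theorem sw_lit (k : Nat) (p : String) (s : String) (hp : p.toList = List.replicate k '=') :
    PySem.Str.startswith s p = decide (k ≤ pvLead s) := by
  rw [PySem.Str.startswith_eq, hp, sw_rep]; rfl

theorem ew_lit (k : Nat) (p : String) (s : String) (hp : p.toList = List.replicate k '=') :
    PySem.Str.endswith s p = decide (k ≤ pvTrail s) := by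
  rw [PySem.Str.endswith_eq, hp, ew_rep]; rfl

def pvBodyA (line : String) : String :=
  if PySem.Str.startswith line "=======" && PySem.Str.endswith line "=======" then
    "# " ++ PySem.Str.replace line "=" ""
  else if PySem.Str.startswith line "======" && PySem.Str.endswith line "======" then
    "## " ++ PySem.Str.replace line "=" ""
  else if PySem.Str.startswith line "=====" && PySem.Str.endswith line "=====" then
    "### " ++ PySem.Str.replace line "=" ""
  else if PySem.Str.startswith line "===" && PySem.Str.endswith line "===" then
    "#### " ++ PySem.Str.replace line "=" ""
  else line

def pvBodyB (line : String) : String :=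
  match pvPrefixTable.get? (min (min (pvLead line) (pvTrail line)) 7) with
  | some pre => pre ++ PySem.Str.replace line "=" ""
  | none => line

theorem body_eq (line : String) : pvBodyA line = pvBodyB line := by
  unfold pvBodyA pvBodyB
  rw [sw_lit 7 "=======" line (by rfl), ew_lit 7 "=======" line (by rfl),
      sw_lit 6 "======" line (by rfl), ew_lit 6 "======" line (by rfl),
      sw_lit 5 "=====" line (by rfl), ew_lit 5 "=====" line (by rfl),
      sw_lit 3 "===" line (by rfl), ew_lit 3 "===" line (by rfl)]
  set L := pvLead line with hL
  set T := pvTrail line with hT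
  by_cases h7 : 7 ≤ L ∧ 7 ≤ T
  · have : min (min L T) 7 = 7 := by omega
    rw [this]
    simp [h7.1, h7.2, pvPrefixTable, PySem.Dict.get?_mk_cons]
  · by_cases h6 : 6 ≤ L ∧ 6 ≤ T
    · have : min (min L T) 7 = 6 := by omega
      rw [this]
      have hne : ¬ (7 ≤ L) ∨ ¬ (7 ≤ T) := by omega
      rcases hne with hne | hne <;>
        simp [hne, h6.1, h6.2, pvPrefixTable, PySem.Dict.get?_mk_cons]
    · by_cases h5 : 5 ≤ L ∧ 5 ≤ T
      · have : min (min L T) 7 = 5 := by omega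
        rw [this]
        have hne : ¬ (6 ≤ L) ∨ ¬ (6 ≤ T) := by omega
        have hne7 : ¬ (7 ≤ L) ∨ ¬ (7 ≤ T) := by omega
        rcases hne with hne | hne <;> rcases hne7 with hne7 | hne7 <;>
          simp [hne, hne7, h5.1, h5.2, pvPrefixTable, PySem.Dict.get?_mk_cons]
      · by_cases h3 : 3 ≤ L ∧ 3 ≤ T
        · have hm : min (min L T) 7 = 3 ∨ min (min L T) 7 = 4 := by omega
          have hne5 : ¬ (5 ≤ L) ∨ ¬ (5 ≤ T) := by omega
          have hne6 : ¬ (6 ≤ L) ∨ ¬ (6 ≤ T) := by omega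
          have hne7 : ¬ (7 ≤ L) ∨ ¬ (7 ≤ T) := by omega
          rcases hm with hm | hm <;> rw [hm] <;>
            rcases hne5 with hne5 | hne5 <;> rcases hne6 with hne6 | hne6 <;>
            rcases hne7 with hne7 | hne7 <;>
            simp [hne5, hne6, hne7, h3.1, h3.2, pvPrefixTable, PySem.Dict.get?_mk_cons]
        · have hm : min (min L T) 7 ≤ 2 := by omega
          have hnone : pvPrefixTable.get? (min (min L T) 7) = none := by
            interval_cases h : min (min L T) 7 <;> rfl
          rw [hnone]
          have hne3 : ¬ (3 ≤ L) ∨ ¬ (3 ≤ T) := by omega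
          have hne5 : ¬ (5 ≤ L) ∨ ¬ (5 ≤ T) := by omega
          have hne6 : ¬ (6 ≤ L) ∨ ¬ (6 ≤ T) := by omega
          have hne7 : ¬ (7 ≤ L) ∨ ¬ (7 ≤ T) := by omega
          rcases hne3 with hne3 | hne3 <;> rcases hne5 with hne5 | hne5 <;>
            rcases hne6 with hne6 | hne6 <;> rcases hne7 with hne7 | hne7 <;>
            simp [hne3, hne5, hne6, hne7]

-- ===== VERDICT (by name: the statement is the Claim_ definition above) =====
theorem fix_dokuwiki_headings_to_markdown_spec : Claim_equal_fix_dokuwiki_headings_to_markdown := by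
  intro lines _
  unfold Spec_fix_dokuwiki_headings_to_markdown
  unfold fix_dokuwiki_headings_to_markdown fix_dokuwiki_headings_to_markdown_alt
  have hA : (fun (new_lines : List String) (p : Int × String) =>
      let line := p.2
      if PySem.Str.startswith line "=======" && PySem.Str.endswith line "=======" then
        new_lines ++ ["# " ++ PySem.Str.replace line "=" ""]
      else if PySem.Str.startswith line "======" && PySem.Str.endswith line "======" then
        new_lines ++ ["## " ++ PySem.Str.replace line "=" ""]
      else if PySem.Str.startswith line "=====" && PySem.Str.endswith line "=====" then
        new_lines ++ ["### " ++ PySem.Str.replace line "=" ""]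
      else if PySem.Str.startswith line "===" && PySem.Str.endswith line "===" then
        new_lines ++ ["#### " ++ PySem.Str.replace line "=" ""]
      else new_lines ++ [line]) =
      (fun new_lines p => new_lines ++ [pvBodyA p.2]) := by
    funext acc p
    simp only [pvBodyA]
    split_ifs <;> rfl
  have hB : (fun (new_lines : List String) (line : String) =>
      let m := min (pvLead line) (pvTrail line)
      new_lines ++ [match pvPrefixTable.get? (min m 7) with
        | some pre => pre ++ PySem.Str.replace line "=" ""
        | none => line]) =
      (fun new_lines line => new_lines ++ [pvBodyB line]) := by
    funext acc line
    simp only [pvBodyB]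
  rw [hA, hB, foldl_append_map, foldl_append_map]
  simp only [List.nil_append]
  have hmap : (PySem.List.enumerate lines).map (fun p => pvBodyA p.2) =
      lines.map pvBodyA := by
    have := PySem.List.map_snd_enumerate lines 0
    calc (PySem.List.enumerate lines).map (fun p => pvBodyA p.2)
        = ((PySem.List.enumerate lines).map Prod.snd).map pvBodyA := by
          rw [List.map_map]; rfl
      _ = lines.map pvBodyA := by rw [this]
  rw [hmap]
  exact List.map_congr_left (fun line _ => body_eq line)
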